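-- pv_equiv track=rewrite | github.com/enricobacis/cineca-scopus | src/utils.py | iterate_names
-- ===== SOURCE A (Python) =====
-- def iterate_names(name, surname):
--     yield name, surname
--     while ' ' in name:
--         name = name.rsplit(' ', 1)[0]
--         yield name, surname
--     while ' ' in surname:
--         surname = surname.rsplit(' ', 1)[0]
--         yield name, surname
-- ===== SOURCE B (Python) =====
-- def iterate_names(name, surname):
--     name_words = name.split(' ')
--     surname_words = surname.split(' ')
--     for k in range(len(name_words), 0, -1):
--         yield ' '.join(name_words[:k]), surname
--     for k in range(len(surname_words) - 1, 0, -1):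
--         yield name_words[0], ' '.join(surname_words[:k])
-- ===== Notes on version B (the rewrite author's own statement) =====
-- stated objective: alternative
-- what changed: B splits each string into its space-separated word list once and emits ' '-joined prefixes with two index-driven range loops, instead of A's two while-loops that repeatedly mutate the strings with rsplit(' ', 1).
import Mathlib
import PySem

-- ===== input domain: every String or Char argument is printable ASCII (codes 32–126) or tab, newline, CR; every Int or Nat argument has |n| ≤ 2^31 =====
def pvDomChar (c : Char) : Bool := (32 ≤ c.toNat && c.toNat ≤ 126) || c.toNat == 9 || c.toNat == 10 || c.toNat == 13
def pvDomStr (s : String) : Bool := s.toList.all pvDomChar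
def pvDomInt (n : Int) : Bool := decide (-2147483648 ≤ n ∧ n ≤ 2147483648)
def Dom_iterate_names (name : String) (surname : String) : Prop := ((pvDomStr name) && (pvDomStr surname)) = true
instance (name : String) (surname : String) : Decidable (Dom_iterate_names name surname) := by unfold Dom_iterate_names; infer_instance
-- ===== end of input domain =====

-- B replaces A's two string-mutating while-loops (rsplit(' ',1)[0] each step) by splitting each
-- string into its space-separated word list once and emitting ' '-joined prefixes with two
-- index-driven range loops (objective: alternative decomposition, same cost).

-- ===== PORT A =====
-- hand port of s.rsplit(' ', 1)[0]: exact whenever ' ' occurs in s (the only case A uses it):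
-- drop the characters after the last space together with that space.
def pvDropLastChunk (cs : List Char) : List Char :=
  (cs.reverse.drop ((cs.reverse.takeWhile (· != ' ')).length + 1)).reverse

-- A's first while-loop; fuel only makes the recursion structural (nm.length suffices).
-- Returns the yielded pairs and the final reduced name.
def pvLoopName : Nat → List Char → List Char → List (List Char × List Char) × List Char
  | 0, nm, _ => ([], nm)
  | fuel+1, nm, sn =>
    if PySem.Chars.isIn [' '] nm then
      let nm' := pvDropLastChunk nm
      let r := pvLoopName fuel nm' sn
      ((nm', sn) :: r.1, r.2)
    else ([], nm)

-- A's second while-loop.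
def pvLoopSurname : Nat → List Char → List Char → List (List Char × List Char)
  | 0, _, _ => []
  | fuel+1, nm, sn =>
    if PySem.Chars.isIn [' '] sn then
      let sn' := pvDropLastChunk sn
      (nm, sn') :: pvLoopSurname fuel nm sn'
    else []

def iterate_names (name : String) (surname : String) : List (String × String) :=
  let n := name.toList
  let s := surname.toList
  let r := pvLoopName n.length n s
  (((n, s) :: r.1) ++ pvLoopSurname s.length r.2 s).map
    (fun p => (String.ofList p.1, String.ofList p.2))

-- ===== PORT B =====
def iterate_names_alt (name : String) (surname : String) : List (String × String) :=
  let nw := PySem.Chars.splitOn name.toList [' ']        -- name.split(' ')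
  let sw := PySem.Chars.splitOn surname.toList [' ']     -- surname.split(' ')
  (PySem.List.pyRange (nw.length : Int) 0 (-1)).map
    (fun k => (String.ofList (PySem.Chars.join [' '] (nw.take k.toNat)), surname))
  ++ (PySem.List.pyRange ((sw.length : Int) - 1) 0 (-1)).map
    (fun k => (String.ofList (PySem.List.pyGetD nw 0 []),
               String.ofList (PySem.Chars.join [' '] (sw.take k.toNat))))

-- ===== PRECONDITION & SPEC =====
def Spec_iterate_names (name : String) (surname : String) (out : List (String × String)) : Prop := out = iterate_names_alt name surname
instance (name : String) (surname : String) (out : List (String × String)) : Decidable (Spec_iterate_names name surname out) := by unfold Spec_iterate_names; infer_instance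

-- ===== CLAIM (what is proved, stated in full; the proofs are below) =====
def Claim_equal_iterate_names : Prop := ∀ (name : String) (surname : String), Dom_iterate_names name surname → Spec_iterate_names name surname (iterate_names name surname)

-- ===== LEMMAS AND PROOFS =====

-- Reference splitter: Python's split(' ') as a plain structural recursion.
def pvSpl : List Char → List (List Char)
  | [] => [[]]
  | c :: rest => if c = ' ' then [] :: pvSpl rest else (pvSpl rest).modifyHead (c :: ·)

theorem pvSpl_ne_nil (cs : List Char) : pvSpl cs ≠ [] := by
  induction cs with
  | nil => simp [pvSpl]
  | cons c rest ih =>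
    simp only [pvSpl]
    split_ifs
    · simp
    · cases h : pvSpl rest with
      | nil => exact absurd h ih
      | cons a t => simp [List.modifyHead]

theorem pvModifyHead_nil (l : List (List Char)) :
    l.modifyHead (fun x => List.reverse ([] : List Char) ++ x) = l := by
  cases l <;> simp

theorem pvSplitOn_go_eq (fuel : Nat) (l cur : List Char) (acc2 : List (List Char))
    (h : l.length < fuel) :
    PySem.Chars.splitOn.go [' '] fuel l cur acc2 =
      acc2.reverse ++ (pvSpl l).modifyHead (cur.reverse ++ ·) := by
  induction fuel generalizing l cur acc2 with
  | zero => omega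
  | succ f ih =>
    cases l with
    | nil => simp [PySem.Chars.splitOn.go, pvSpl, List.modifyHead]
    | cons c rest =>
      simp only [PySem.Chars.splitOn.go]
      by_cases hc : c = ' '
      · subst hc
        have hpre : [' '].isPrefixOf (' ' :: rest) = true := by
          simp [List.isPrefixOf]
        simp only [hpre, if_pos]
        have hd : List.drop [' '].length (' ' :: rest) = rest := by simp
        rw [hd, ih rest [] (cur.reverse :: acc2) (by simpa using Nat.lt_of_succ_lt_succ h)]
        rw [pvModifyHead_nil]
        simp [pvSpl, List.modifyHead]
      · have hpre : [' '].isPrefixOf (c :: rest) = false := by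
          simp [List.isPrefixOf]
          exact fun h => hc h.symm
        simp only [hpre, Bool.false_eq_true, if_false]
        rw [ih rest (c :: cur) _ (by simpa using Nat.lt_of_succ_lt_succ h)]
        simp only [pvSpl, if_neg hc, List.modifyHead_modifyHead]
        have hfun : (fun x => (c :: cur).reverse ++ x)
            = ((fun x => cur.reverse ++ x) ∘ fun x => c :: x) := by
          funext x; simp
        rw [hfun]

theorem pvSplitOn_eq (cs : List Char) :
    PySem.Chars.splitOn cs [' '] = pvSpl cs := by
  show PySem.Chars.splitOn.go [' '] (cs.length + 1) cs [] [] = pvSpl cs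
  rw [pvSplitOn_go_eq (cs.length + 1) cs [] [] (by omega), pvModifyHead_nil]
  simp

theorem pvJoin_pvSpl (cs : List Char) :
    PySem.Chars.join [' '] (pvSpl cs) = cs := by
  induction cs with
  | nil => simp [pvSpl, PySem.Chars.join, List.intercalate]
  | cons c rest ih =>
    simp only [pvSpl]
    by_cases hc : c = ' '
    · subst hc
      cases h : pvSpl rest with
      | nil => exact absurd h (pvSpl_ne_nil rest)
      | cons a t =>
        rw [h] at ih
        simp only [PySem.Chars.join, List.intercalate] at ih ⊢
        simp at ih ⊢
        exact ih
    · simp only [if_neg hc]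
      cases h : pvSpl rest with
      | nil => exact absurd h (pvSpl_ne_nil rest)
      | cons a t =>
        rw [h] at ih
        simp only [List.modifyHead, PySem.Chars.join, List.intercalate] at ih ⊢
        cases t with
        | nil => simpa using congrArg (c :: ·) ih
        | cons b t' =>
          simp [List.intersperse] at ih ⊢
          simpa using congrArg (c :: ·) ih

theorem pvSpl_no_space (cs w : List Char) (hw : w ∈ pvSpl cs) : ' ' ∉ w := by
  induction cs generalizing w with
  | nil => simp [pvSpl] at hw; simp [hw]
  | cons c rest ih =>
    simp only [pvSpl] at hw
    by_cases hc : c = ' '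
    · rw [if_pos hc] at hw
      rcases List.mem_cons.mp hw with h | h
      · simp [h]
      · exact ih w h
    · rw [if_neg hc] at hw
      cases h : pvSpl rest with
      | nil => exact absurd h (pvSpl_ne_nil rest)
      | cons a t =>
        rw [h] at hw
        simp only [List.modifyHead] at hw
        rcases List.mem_cons.mp hw with h' | h'
        · subst h'
          intro hmem
          rcases List.mem_cons.mp hmem with h'' | h''
          · exact hc h''.symm
          · exact ih a (h ▸ List.mem_cons_self) h''
        · exact ih w (h ▸ List.mem_cons_of_mem a h')

theorem pvSpl_length_le (cs : List Char) : (pvSpl cs).length ≤ cs.length + 1 := by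
  induction cs with
  | nil => simp [pvSpl]
  | cons c rest ih =>
    simp only [pvSpl]
    split_ifs
    · simpa using Nat.succ_le_succ ih
    · calc ((pvSpl rest).modifyHead (c :: ·)).length = (pvSpl rest).length := by
            simp
        _ ≤ rest.length + 1 := ih
        _ ≤ (c :: rest).length + 1 := by simp

theorem pvJoin_snoc (ws : List (List Char)) (w : List Char) (h : ws ≠ []) :
    PySem.Chars.join [' '] (ws ++ [w]) = PySem.Chars.join [' '] ws ++ ' ' :: w := by
  induction ws with
  | nil => exact absurd rfl h
  | cons a ws' ih =>
    cases ws' with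
    | nil => simp [PySem.Chars.join, List.intercalate, List.intersperse]
    | cons b t =>
      have := ih (by simp)
      simp only [PySem.Chars.join, List.intercalate] at this ⊢
      simp [List.intersperse] at this ⊢
      simpa [List.append_assoc] using congrArg (fun l => a ++ ' ' :: l) this

theorem pvJoin_singleton (w : List Char) : PySem.Chars.join [' '] [w] = w := by
  simp [PySem.Chars.join, List.intercalate]

theorem pvIsIn_space_iff (cs : List Char) :
    PySem.Chars.isIn [' '] cs = true ↔ ' ' ∈ cs := by
  unfold PySem.Chars.isIn
  rw [bne_iff_ne, ne_eq, not_iff_comm, PySem.Chars.find_eq_neg_one_iff]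
  rw [List.singleton_infix_iff]

theorem pvDropLastChunk_snoc (ws : List (List Char)) (w : List Char)
    (h : ws ≠ []) (hw : ' ' ∉ w) :
    pvDropLastChunk (PySem.Chars.join [' '] (ws ++ [w])) = PySem.Chars.join [' '] ws := by
  rw [pvJoin_snoc ws w h]
  unfold pvDropLastChunk
  have hrev : (PySem.Chars.join [' '] ws ++ ' ' :: w).reverse
      = w.reverse ++ ' ' :: (PySem.Chars.join [' '] ws).reverse := by
    simp
  rw [hrev]
  have htw : (w.reverse ++ ' ' :: (PySem.Chars.join [' '] ws).reverse).takeWhile (· != ' ')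
      = w.reverse := by
    rw [List.takeWhile_append_of_pos (by intro a ha; simp; intro hae; exact hw (by simpa [hae] using (List.mem_reverse.mp ha)))]
    simp [List.takeWhile]
  rw [htw]
  rw [List.length_reverse]
  rw [show w.length + 1 = (w.reverse ++ [' ']).length by simp]
  rw [show w.reverse ++ ' ' :: (PySem.Chars.join [' '] ws).reverse
      = (w.reverse ++ [' ']) ++ (PySem.Chars.join [' '] ws).reverse by simp]
  rw [List.drop_left, List.reverse_reverse]

theorem pvHeadD_snoc (ws : List (List Char)) (w : List Char) (h : ws ≠ []) :
    (ws ++ [w]).headD [] = ws.headD [] := by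
  cases ws with
  | nil => exact absurd rfl h
  | cons a t => simp

theorem pvLoopName_join (ws : List (List Char)) (sn : List Char) :
    ∀ fuel, ws ≠ [] → (∀ w ∈ ws, ' ' ∉ w) → ws.length - 1 ≤ fuel →
    pvLoopName fuel (PySem.Chars.join [' '] ws) sn =
      ((List.range (ws.length - 1)).map
        (fun j => (PySem.Chars.join [' '] (ws.take (ws.length - 1 - j)), sn)),
       ws.headD []) := by
  induction ws using List.reverseRecOn with
  | nil => intro fuel h _ _; exact absurd rfl h
  | append_singleton ws₀ w ih =>
    intro fuel _ hw hfuel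
    by_cases h0 : ws₀ = []
    · subst h0
      simp only [List.nil_append, pvJoin_singleton]
      have hno : PySem.Chars.isIn [' '] w = false := by
        rw [← Bool.not_eq_true, pvIsIn_space_iff]
        exact hw w (by simp)
      cases fuel with
      | zero => simp [pvLoopName]
      | succ f => simp [pvLoopName, hno]
    · have hlen : (ws₀ ++ [w]).length - 1 = ws₀.length := by simp
      have h1 : 1 ≤ ws₀.length := List.length_pos_iff.mpr h0
      cases fuel with
      | zero => omega
      | succ f =>
        have hin : PySem.Chars.isIn [' '] (PySem.Chars.join [' '] (ws₀ ++ [w])) = true := by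
          rw [pvIsIn_space_iff, pvJoin_snoc ws₀ w h0]
          simp
        simp only [pvLoopName, hin, if_pos]
        rw [pvDropLastChunk_snoc ws₀ w h0 (hw w (by simp))]
        rw [ih f h0 (fun x hx => hw x (by simp [hx])) (by omega)]
        rw [hlen, pvHeadD_snoc ws₀ w h0]
        refine Prod.ext ?_ rfl
        simp only
        rw [show ws₀.length = (ws₀.length - 1) + 1 by omega, List.range_succ_eq_map]
        simp only [List.map_cons, List.map_map]
        congr 1
        · rw [show (ws₀.length - 1) + 1 - 0 = ws₀.length by omega]
          rw [List.take_append_of_le_length (le_refl _), List.take_length]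
        · apply List.map_congr_left
          intro j _
          simp only [Function.comp]
          congr 2
          rw [List.take_append_of_le_length (by omega)]
          congr 1
          omega

theorem pvLoopSurname_join (ws : List (List Char)) (nm : List Char) :
    ∀ fuel, ws ≠ [] → (∀ w ∈ ws, ' ' ∉ w) → ws.length - 1 ≤ fuel →
    pvLoopSurname fuel nm (PySem.Chars.join [' '] ws) =
      (List.range (ws.length - 1)).map
        (fun j => (nm, PySem.Chars.join [' '] (ws.take (ws.length - 1 - j)))) := by
  induction ws using List.reverseRecOn with
  | nil => intro fuel h _ _; exact absurd rfl h
  | append_singleton ws₀ w ih =>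
    intro fuel _ hw hfuel
    by_cases h0 : ws₀ = []
    · subst h0
      simp only [List.nil_append, pvJoin_singleton]
      have hno : PySem.Chars.isIn [' '] w = false := by
        rw [← Bool.not_eq_true, pvIsIn_space_iff]
        exact hw w (by simp)
      cases fuel with
      | zero => simp [pvLoopSurname]
      | succ f => simp [pvLoopSurname, hno]
    · have hlen : (ws₀ ++ [w]).length - 1 = ws₀.length := by simp
      have h1 : 1 ≤ ws₀.length := List.length_pos_iff.mpr h0
      cases fuel with
      | zero => omega
      | succ f =>
        have hin : PySem.Chars.isIn [' '] (PySem.Chars.join [' '] (ws₀ ++ [w])) = true := by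
          rw [pvIsIn_space_iff, pvJoin_snoc ws₀ w h0]
          simp
        simp only [pvLoopSurname, hin, if_pos]
        rw [pvDropLastChunk_snoc ws₀ w h0 (hw w (by simp))]
        rw [ih f h0 (fun x hx => hw x (by simp [hx])) (by omega)]
        rw [hlen]
        rw [show ws₀.length = (ws₀.length - 1) + 1 by omega, List.range_succ_eq_map]
        simp only [List.map_cons, List.map_map]
        congr 1
        · rw [show (ws₀.length - 1) + 1 - 0 = ws₀.length by omega]
          rw [List.take_append_of_le_length (le_refl _), List.take_length]
        · apply List.map_congr_left
          intro j _
          simp only [Function.comp]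
          congr 2
          rw [List.take_append_of_le_length (by omega)]
          congr 1
          omega

theorem pvGetD_zero_head (ws : List (List Char)) (h : ws ≠ []) :
    PySem.List.pyGetD ws 0 [] = ws.headD [] := by
  cases ws with
  | nil => exact absurd rfl h
  | cons a t => simp [PySem.List.pyGetD, PySem.List.pyGet?, PySem.List.pyIdx?]

theorem pvConsRangeMap {β : Type} (L : Nat) (h : 1 ≤ L) (a : β) (f : Nat → β) (G : Nat → β)
    (h0 : G 0 = a) (hs : ∀ j, j < L - 1 → f j = G (j + 1)) :
    a :: (List.range (L - 1)).map f = (List.range L).map G := by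
  conv_rhs => rw [show L = (L - 1) + 1 by omega, List.range_succ_eq_map]
  rw [List.map_cons, List.map_map, h0]
  congr 1
  apply List.map_congr_left
  intro j hj
  simp only [Function.comp_apply, Nat.succ_eq_add_one]
  exact hs j (List.mem_range.mp hj)

-- ===== VERDICT (by name: the statement is the Claim_ definition above) =====
theorem iterate_names_spec : Claim_equal_iterate_names := by
  intro name surname _
  unfold Spec_iterate_names iterate_names iterate_names_alt
  simp only [pvSplitOn_eq]
  have hnwne := pvSpl_ne_nil name.toList
  have hswne := pvSpl_ne_nil surname.toList
  have hL : 1 ≤ (pvSpl name.toList).length := List.length_pos_iff.mpr hnwne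
  have hM : 1 ≤ (pvSpl surname.toList).length := List.length_pos_iff.mpr hswne
  have hjn := pvJoin_pvSpl name.toList
  have hjs := pvJoin_pvSpl surname.toList
  have hjnlen : (PySem.Chars.join [' '] (pvSpl name.toList)).length = name.toList.length := by
    rw [hjn]
  have hjslen : (PySem.Chars.join [' '] (pvSpl surname.toList)).length = surname.toList.length := by
    rw [hjs]
  have hfn : (pvSpl name.toList).length - 1
      ≤ (PySem.Chars.join [' '] (pvSpl name.toList)).length := by
    have := pvSpl_length_le name.toList; omega
  have hfs : (pvSpl surname.toList).length - 1
      ≤ (PySem.Chars.join [' '] (pvSpl surname.toList)).length := by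
    have := pvSpl_length_le surname.toList; omega
  have hloopN := pvLoopName_join (pvSpl name.toList) surname.toList
      ((PySem.Chars.join [' '] (pvSpl name.toList)).length) hnwne (pvSpl_no_space name.toList) hfn
  rw [hjn] at hloopN
  have hloopS := pvLoopSurname_join (pvSpl surname.toList) ((pvSpl name.toList).headD [])
      ((PySem.Chars.join [' '] (pvSpl surname.toList)).length) hswne (pvSpl_no_space surname.toList) hfs
  rw [hjs] at hloopS
  rw [hloopN]
  simp only []
  rw [hloopS]
  rw [PySem.List.pyRange_neg_one, PySem.List.pyRange_neg_one]
  rw [show ((((pvSpl name.toList).length : Int)) - 0).toNat = (pvSpl name.toList).length by omega]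
  rw [show (((pvSpl surname.toList).length : Int) - 1 - 0).toNat
      = (pvSpl surname.toList).length - 1 by omega]
  rw [List.map_map, List.map_map]
  have hsur : String.ofList surname.toList = surname := String.ofList_toList
  simp only [List.map_append, List.map_cons, List.map_map]
  congr 1
  · -- name phase
    apply pvConsRangeMap (pvSpl name.toList).length hL
    · simp only [Function.comp_apply]
      rw [show ((((pvSpl name.toList).length : Int)) - ((0 : Nat) : Int)).toNat
          = (pvSpl name.toList).length by omega]
      rw [List.take_length, hjn, hsur]
    · intro j hj
      simp only [Function.comp_apply]
      rw [hsur]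
      congr 3
      congr 1
      omega
  · -- surname phase
    apply List.map_congr_left
    intro j hj
    simp only [Function.comp_apply]
    rw [pvGetD_zero_head (pvSpl name.toList) hnwne]
    congr 3
    congr 1
    omega
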